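-- pv_equiv track=rewrite | github.com/todayis-sunny/Algorithm | 프로그래머스/unrated/152995. 인사고과/인사고과.py | solution
-- ===== SOURCE A (Python) =====
-- def solution(scores):
--     answer = 1
--     wh = scores[0]
--     wh_sco = sum(wh)
--     scores.sort(key = lambda x:(-x[0], x[1]))
--     max_sco = 0
--     for i in range(len(scores)):
--         total = sum(scores[i])
--         if wh[0] < scores[i][0] and wh[1] < scores[i][1]:
--             return -1
--
--         if scores[i][1] >= max_sco:
--             max_sco = scores[i][1]
--             if scores[i][0] + scores[i][1] > wh_sco:
--                 answer += 1
--
--     return answer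
-- ===== SOURCE B (Python) =====
-- # Alternative re-implementation: explicit Pareto-domination scans instead of sort + running max.
-- # NOTE: A sorts `scores` in place; B does not mutate its argument (equivalence claimed for the return value only).
-- def solution(scores):
--     wh = scores[0]
--     if any(f[0] > wh[0] and f[1] > wh[1] for f in scores):
--         return -1
--     target = sum(wh)
--     return 1 + sum(1 for e in scores
--                    if e[0] + e[1] > target
--                    and not any(f[0] > e[0] and f[1] > e[1] for f in scores))
-- ===== Notes on version B (the rewrite author's own statement) =====
-- stated objective: alternative
-- what changed: B replaces A's sort-by-(-a,b) plus running-max single pass with direct Pareto-domination scans (count employees whose two-score total beats employee 0's total and whom nobody strictly dominates) and does not mutate scores; Pre_ excludes only the inputs where A raises IndexError (empty list, or an inner list shorter than 2).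
-- intended difference: When employee 0 is undominated and some undominated employee with a negative second score has a two-score total above employee 0's total, A's running max initialised to 0 skips that employee and undercounts (e.g. returns 1 on [[1,-1],[3,-2]]), while B counts it (returns 2), as the ranking definition intends. — e.g. on solution([[1, -1], [3, -2]]): A returns 1, B returns 2
import Mathlib
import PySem

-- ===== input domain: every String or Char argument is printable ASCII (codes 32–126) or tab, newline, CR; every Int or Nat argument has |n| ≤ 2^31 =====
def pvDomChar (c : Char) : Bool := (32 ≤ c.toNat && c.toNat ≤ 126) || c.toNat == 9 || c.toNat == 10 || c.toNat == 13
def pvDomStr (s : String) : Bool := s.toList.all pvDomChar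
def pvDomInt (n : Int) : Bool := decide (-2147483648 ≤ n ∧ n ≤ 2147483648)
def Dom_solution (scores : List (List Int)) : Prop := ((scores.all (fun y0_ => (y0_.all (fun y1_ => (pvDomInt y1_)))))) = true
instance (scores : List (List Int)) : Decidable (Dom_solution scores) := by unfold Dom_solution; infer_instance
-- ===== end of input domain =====

-- B replaces A's sort + running-max pass with direct Pareto-domination scans; equivalence is about the
-- RETURN value only (A sorts `scores` in place, B does not mutate it).

-- ===== PORT A =====
-- xs[i] with getD 0: Python raises IndexError where pyGet? is none; such inputs are outside Pre_solution
def pvGetA (e : List Int) (i : Int) : Int := (PySem.List.pyGet? e i).getD 0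

-- the for-loop of A, with early `return -1`; state = (answer, max_sco)
def solutionGo (wh0 wh1 whSco : Int) : List (List Int) → Int → Int → Int
  | [], answer, _maxSco => answer
  | e :: rest, answer, maxSco =>
    if wh0 < pvGetA e 0 ∧ wh1 < pvGetA e 1 then -1
    else if maxSco ≤ pvGetA e 1 then
      solutionGo wh0 wh1 whSco rest
        (if whSco < pvGetA e 0 + pvGetA e 1 then answer + 1 else answer) (pvGetA e 1)
    else
      solutionGo wh0 wh1 whSco rest answer maxSco

def solution (scores : List (List Int)) : Int :=
  let answer : Int := 1
  let wh := (PySem.List.pyGet? scores 0).getD []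
  let whSco := wh.sum
  -- scores.sort(key = lambda x: (-x[0], x[1]))
  let s := PySem.List.sorted2 scores (fun x => -(pvGetA x 0)) (fun x => pvGetA x 1)
  solutionGo (pvGetA wh 0) (pvGetA wh 1) whSco s answer 0

-- ===== PORT B =====
def solution_alt (scores : List (List Int)) : Int :=
  let wh := (PySem.List.pyGet? scores 0).getD []
  let wh0 := (PySem.List.pyGet? wh 0).getD 0
  let wh1 := (PySem.List.pyGet? wh 1).getD 0
  if scores.any (fun f => decide (wh0 < (PySem.List.pyGet? f 0).getD 0) &&
                          decide (wh1 < (PySem.List.pyGet? f 1).getD 0)) then -1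
  else
    let target := wh.sum
    1 + ((scores.countP (fun e =>
          decide (target < (PySem.List.pyGet? e 0).getD 0 + (PySem.List.pyGet? e 1).getD 0) &&
          !(scores.any (fun f => decide ((PySem.List.pyGet? e 0).getD 0 < (PySem.List.pyGet? f 0).getD 0) &&
                                 decide ((PySem.List.pyGet? e 1).getD 0 < (PySem.List.pyGet? f 1).getD 0))))) : Int)

-- ===== PRECONDITION & SPEC =====
-- Pre_ excludes exactly the inputs on which A raises IndexError: the empty list (scores[0]) and inner
-- lists with fewer than 2 entries (x[1]).
def Pre_solution (scores : List (List Int)) : Prop :=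
  scores ≠ [] ∧ ∀ e ∈ scores, 2 ≤ e.length
instance (scores : List (List Int)) : Decidable (Pre_solution scores) := by unfold Pre_solution; infer_instance
def pvWitness_solution : List (List Int) := [[4, 5], [2, 1]]

-- When employee 0 is undominated and some undominated employee with a negative second score has a
-- two-score total above employee 0's total, A's running max initialised to 0 skips that employee and
-- undercounts, while B counts it, as the ranking definition intends.
-- "nobody strictly dominates e in l" (reading each row's first two entries)
def good (l : List (List Int)) (e : List Int) : Prop :=
  ∀ f ∈ l, ¬ (e.getD 0 0 < f.getD 0 0 ∧ e.getD 1 0 < f.getD 1 0)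
def D_solution (scores : List (List Int)) : Prop :=
  ∃ e ∈ scores, e.getD 1 0 < 0 ∧ (scores.getD 0 []).sum < e.getD 0 0 + e.getD 1 0 ∧
    good scores e ∧ good scores (scores.getD 0 [])
instance (scores : List (List Int)) : Decidable (D_solution scores) := by unfold D_solution good; infer_instance

def Spec_solution (scores : List (List Int)) (out : Int) : Prop := ¬ D_solution scores → out = solution_alt scores
instance (scores : List (List Int)) (out : Int) : Decidable (Spec_solution scores out) := by unfold Spec_solution; infer_instance

def pvDiffWitness_solution : List (List Int) := [[1, -1], [3, -2]]
def pvDiffWitnessOut_solution : Int × Int := (1, 2)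

-- ===== CLAIM (what is proved, stated in full; the proofs are below) =====
def Claim_unchanged_solution : Prop := ∀ (scores : List (List Int)), Dom_solution scores → Pre_solution scores → Spec_solution scores (solution scores)
def Claim_changed_solution : Prop := Dom_solution (pvDiffWitness_solution) ∧ Pre_solution (pvDiffWitness_solution) ∧ D_solution (pvDiffWitness_solution) ∧ solution (pvDiffWitness_solution) = pvDiffWitnessOut_solution.1 ∧ solution_alt (pvDiffWitness_solution) = pvDiffWitnessOut_solution.2 ∧ pvDiffWitnessOut_solution.1 ≠ pvDiffWitnessOut_solution.2
def Claim_exact_solution : Prop := ∀ (scores : List (List Int)), Dom_solution scores → Pre_solution scores → D_solution scores → solution scores ≠ solution_alt scores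

-- ===== LEMMAS AND PROOFS =====

-- "f strictly dominates (a, b) for some f in l" (B's inner scans)
def domB (l : List (List Int)) (a b : Int) : Bool :=
  l.any (fun f => decide (a < (PySem.List.pyGet? f 0).getD 0) && decide (b < (PySem.List.pyGet? f 1).getD 0))

-- the comparison sorted2 uses for key (-x[0], x[1])
def bef (a b : List Int) : Bool :=
  decide (-(pvGetA a 0) < -(pvGetA b 0)) || (!decide (-(pvGetA b 0) < -(pvGetA a 0)) && decide (pvGetA a 1 < pvGetA b 1))

theorem insertBy_nil {α : Type} (b : α → α → Bool) (x : α) : PySem.List.insertBy b x [] = [x] := by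
  simp [PySem.List.insertBy]

theorem insertBy_cons {α : Type} (b : α → α → Bool) (x y : α) (ys : List α) :
    PySem.List.insertBy b x (y :: ys) = if b x y then x :: y :: ys else y :: PySem.List.insertBy b x ys := by
  simp [PySem.List.insertBy]

theorem pairwise_insertBy {α : Type} (before : α → α → Bool)
    (hasym : ∀ a b, before a b = true → before b a = false)
    (htrans : ∀ a b c, before b a = false → before c b = false → before c a = false)
    (x : α) (l : List α) (h : l.Pairwise (fun a b => before b a = false)) :
    (PySem.List.insertBy before x l).Pairwise (fun a b => before b a = false) := by
  revert h
  induction l with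
  | nil => intro _; rw [insertBy_nil]; exact List.pairwise_singleton _ _
  | cons y ys ih =>
    intro h
    obtain ⟨hy, hys⟩ := List.pairwise_cons.mp h
    rw [insertBy_cons]
    by_cases hxy : before x y = true
    · rw [if_pos hxy]
      refine List.pairwise_cons.mpr ⟨?_, h⟩
      intro z hz
      rcases List.mem_cons.mp hz with rfl | hz
      · exact hasym x z hxy
      · exact htrans x y z (hasym x y hxy) (hy z hz)
    · rw [if_neg hxy]
      refine List.pairwise_cons.mpr ⟨?_, ih hys⟩
      intro z hz
      rcases (PySem.List.mem_insertBy before x z ys).mp hz with rfl | hz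
      · revert hxy; cases before z y <;> simp
      · exact hy z hz

theorem pairwise_foldl_insertBy {α : Type} (before : α → α → Bool)
    (hasym : ∀ a b, before a b = true → before b a = false)
    (htrans : ∀ a b c, before b a = false → before c b = false → before c a = false)
    (xs : List α) (acc : List α) (h : acc.Pairwise (fun a b => before b a = false)) :
    (xs.foldl (fun acc x => PySem.List.insertBy before x acc) acc).Pairwise (fun a b => before b a = false) := by
  induction xs generalizing acc with
  | nil => exact h
  | cons x xs ih => exact ih _ (pairwise_insertBy before hasym htrans x acc h)

theorem sorted2_eq_foldl (xs : List (List Int)) :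
    PySem.List.sorted2 xs (fun x => -(pvGetA x 0)) (fun x => pvGetA x 1) =
      xs.foldl (fun acc x => PySem.List.insertBy bef x acc) [] := rfl

theorem sorted2_pairwise_bef (xs : List (List Int)) :
    (PySem.List.sorted2 xs (fun x => -(pvGetA x 0)) (fun x => pvGetA x 1)).Pairwise
      (fun a b => bef b a = false) := by
  rw [sorted2_eq_foldl]
  refine pairwise_foldl_insertBy bef ?_ ?_ xs [] List.Pairwise.nil
  · intro a b hab; revert hab; simp [bef]; omega
  · intro a b c h1 h2; revert h1 h2; simp [bef]; omega

theorem bef_false_iff (e g : List Int) :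
    bef g e = false ↔ (pvGetA g 0 ≤ pvGetA e 0 ∧ (pvGetA g 0 < pvGetA e 0 ∨ pvGetA e 1 ≤ pvGetA g 1)) := by
  simp [bef]; omega

theorem domB_cons (e : List Int) (l : List (List Int)) (a b : Int) :
    domB (e :: l) a b = ((decide (a < pvGetA e 0) && decide (b < pvGetA e 1)) || domB l a b) := rfl

theorem go_spec (wh0 wh1 whSco : Int) :
    ∀ (s : List (List Int)), s.Pairwise (fun a b => bef b a = false) →
    ∀ (answer m : Int),
    solutionGo wh0 wh1 whSco s answer m =
      if domB s wh0 wh1 then -1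
      else answer + ((s.countP (fun e => decide (whSco < pvGetA e 0 + pvGetA e 1) &&
            decide (m ≤ pvGetA e 1) && !(domB s (pvGetA e 0) (pvGetA e 1)))) : Int) := by
  intro s
  induction s with
  | nil => intro _ answer m; simp [solutionGo, domB]
  | cons e r ih =>
    intro h answer m
    obtain ⟨he, hr⟩ := List.pairwise_cons.mp h
    have hRe : ∀ g ∈ r, pvGetA g 0 ≤ pvGetA e 0 ∧ (pvGetA g 0 < pvGetA e 0 ∨ pvGetA e 1 ≤ pvGetA g 1) :=
      fun g hg => (bef_false_iff e g).mp (he g hg)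
    by_cases hdom : wh0 < pvGetA e 0 ∧ wh1 < pvGetA e 1
    · have hd : domB (e :: r) wh0 wh1 = true := by
        rw [domB_cons]
        simp only [Bool.or_eq_true, Bool.and_eq_true, decide_eq_true_eq]
        exact Or.inl hdom
      simp only [solutionGo, if_pos hdom, hd, if_true]
    · have hd : domB (e :: r) wh0 wh1 = domB r wh0 wh1 := by
        rw [domB_cons]
        have hfalse : (decide (wh0 < pvGetA e 0) && decide (wh1 < pvGetA e 1)) = false := by
          revert hdom
          by_cases h0 : wh0 < pvGetA e 0 <;> by_cases h1 : wh1 < pvGetA e 1 <;> simp [h0, h1]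
        rw [hfalse, Bool.false_or]
      have hndomhead : ∀ (g : List Int), domB (e :: r) (pvGetA g 0) (pvGetA g 1) =
          ((decide (pvGetA g 0 < pvGetA e 0) && decide (pvGetA g 1 < pvGetA e 1)) || domB r (pvGetA g 0) (pvGetA g 1)) :=
        fun g => domB_cons e r (pvGetA g 0) (pvGetA g 1)
      have hEund : domB (e :: r) (pvGetA e 0) (pvGetA e 1) = false := by
        rw [domB_cons]
        simp only [Bool.or_eq_false_iff, Bool.and_eq_false_iff]
        refine ⟨Or.inl (by simp), ?_⟩
        rw [domB]
        simp only [List.any_eq_false]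
        intro f hf
        have h1 := (hRe f hf).1
        simp only [pvGetA] at h1 ⊢
        simp only [Bool.and_eq_true, decide_eq_true_eq, not_and]
        intro hcon
        omega
      by_cases hge : m ≤ pvGetA e 1
      · simp only [solutionGo, if_neg hdom, if_pos hge]
        rw [ih hr _ (pvGetA e 1), hd]
        by_cases hdr : domB r wh0 wh1 = true
        · simp only [hdr, if_true]
        · simp only [Bool.not_eq_true] at hdr
          simp only [hdr, Bool.false_eq_true, if_false]
          have hcnt : List.countP (fun g => decide (whSco < pvGetA g 0 + pvGetA g 1) &&
                decide (pvGetA e 1 ≤ pvGetA g 1) && !domB r (pvGetA g 0) (pvGetA g 1)) r =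
              List.countP (fun g => decide (whSco < pvGetA g 0 + pvGetA g 1) &&
                decide (m ≤ pvGetA g 1) && !domB (e :: r) (pvGetA g 0) (pvGetA g 1)) r := by
            refine List.countP_congr ?_
            intro g hg
            rw [hndomhead g]
            rcases hRe g hg with ⟨hle0, hcase⟩
            by_cases h1 : pvGetA e 1 ≤ pvGetA g 1
            · have hm : m ≤ pvGetA g 1 := le_trans hge h1
              have hh : (decide (pvGetA g 0 < pvGetA e 0) && decide (pvGetA g 1 < pvGetA e 1)) = false := by
                simp only [Bool.and_eq_false_iff, decide_eq_false_iff_not]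
                right; omega
              simp [hh, h1, hm]
            · have h0 : pvGetA g 0 < pvGetA e 0 := by rcases hcase with h' | h'; exact h'; omega
              have hh : (decide (pvGetA g 0 < pvGetA e 0) && decide (pvGetA g 1 < pvGetA e 1)) = true := by
                simp only [Bool.and_eq_true, decide_eq_true_eq]
                exact ⟨h0, by omega⟩
              simp [hh, h1]
          rw [List.countP_cons]
          rw [← hcnt, hEund]
          by_cases hc : whSco < pvGetA e 0 + pvGetA e 1
          · simp [hc, hge]
            omega
          · simp [hc, hge]
      · simp only [solutionGo, if_neg hdom, if_neg hge]
        rw [ih hr answer m, hd]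
        by_cases hdr : domB r wh0 wh1 = true
        · simp only [hdr, if_true]
        · simp only [Bool.not_eq_true] at hdr
          simp only [hdr, Bool.false_eq_true, if_false]
          rw [List.countP_cons]
          have hcnt : List.countP (fun g => decide (whSco < pvGetA g 0 + pvGetA g 1) &&
                decide (m ≤ pvGetA g 1) && !domB r (pvGetA g 0) (pvGetA g 1)) r =
              List.countP (fun g => decide (whSco < pvGetA g 0 + pvGetA g 1) &&
                decide (m ≤ pvGetA g 1) && !domB (e :: r) (pvGetA g 0) (pvGetA g 1)) r := by
            refine List.countP_congr ?_
            intro g hg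
            rw [hndomhead g]
            by_cases hm : m ≤ pvGetA g 1
            · have hh : (decide (pvGetA g 0 < pvGetA e 0) && decide (pvGetA g 1 < pvGetA e 1)) = false := by
                simp only [Bool.and_eq_false_iff, decide_eq_false_iff_not]
                right; omega
              simp [hh]
            · simp [hm]
          rw [← hcnt]
          simp [hge]

theorem countP_lt {α : Type} (p q : α → Bool) :
    ∀ (l : List α), (∀ a ∈ l, p a = true → q a = true) →
    ∀ x ∈ l, q x = true → p x = false → l.countP p < l.countP q := by
  intro l
  induction l with
  | nil => intro _ x hx; exact absurd hx (by simp)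
  | cons a t ih =>
    intro himp x hx hqx hpx
    rw [List.countP_cons, List.countP_cons]
    have hmono : t.countP p ≤ t.countP q :=
      List.countP_mono_left (fun b hb => himp b (List.mem_cons_of_mem _ hb))
    rcases List.mem_cons.mp hx with rfl | hxt
    · rw [hpx, hqx]
      simp
      omega
    · have hlt := ih (fun b hb => himp b (List.mem_cons_of_mem _ hb)) x hxt hqx hpx
      have hhead : (if p a = true then 1 else 0) ≤ (if q a = true then 1 else 0) := by
        by_cases hpa : p a = true
        · simp [hpa, himp a List.mem_cons_self hpa]
        · simp [hpa]
      omega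

theorem domB_perm {l₁ l₂ : List (List Int)} (h : l₁.Perm l₂) (a b : Int) :
    domB l₁ a b = domB l₂ a b := h.any_eq

theorem domB_eq_false_iff (l : List (List Int)) (a b : Int) :
    domB l a b = false ↔ ∀ f ∈ l, ¬ (a < pvGetA f 0 ∧ b < pvGetA f 1) := by
  simp [domB, pvGetA]

theorem pyGet?_cons_zero (x : List Int) (l : List (List Int)) : PySem.List.pyGet? (x :: l) 0 = some x := by
  simp [PySem.List.pyGet?, PySem.List.pyIdx?]

theorem getD_zero_eq (e : List Int) (h : 2 ≤ e.length) : e.getD 0 0 = pvGetA e 0 := by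
  match e, h with
  | x :: y :: l, _ =>
    simp [pvGetA, PySem.List.pyGet?, PySem.List.pyIdx?]
    rw [if_pos (by omega)]
    simp

theorem getD_one_eq (e : List Int) (h : 2 ≤ e.length) : e.getD 1 0 = pvGetA e 1 := by
  match e, h with
  | x :: y :: l, _ => simp [pvGetA, PySem.List.pyGet?, PySem.List.pyIdx?]

theorem solution_closed (w : List Int) (t : List (List Int)) :
    solution (w :: t) =
      if domB (w :: t) (pvGetA w 0) (pvGetA w 1) then -1
      else 1 + ((List.countP (fun e => decide (w.sum < pvGetA e 0 + pvGetA e 1) &&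
          decide ((0 : Int) ≤ pvGetA e 1) && !(domB (w :: t) (pvGetA e 0) (pvGetA e 1))) (w :: t)) : Int) := by
  have hperm := PySem.List.sorted2_perm (w :: t) (fun x => -(pvGetA x 0)) (fun x => pvGetA x 1) false
  have hpair := sorted2_pairwise_bef (w :: t)
  have hgo := go_spec (pvGetA w 0) (pvGetA w 1) w.sum _ hpair 1 0
  simp only [solution, pyGet?_cons_zero, Option.getD_some]
  rw [hgo, domB_perm hperm (pvGetA w 0) (pvGetA w 1),
      List.countP_congr (fun e he => by rw [domB_perm hperm]),
      hperm.countP_eq]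

theorem alt_closed (w : List Int) (t : List (List Int)) :
    solution_alt (w :: t) =
      if domB (w :: t) (pvGetA w 0) (pvGetA w 1) then -1
      else 1 + ((List.countP (fun e => decide (w.sum < pvGetA e 0 + pvGetA e 1) &&
          !(domB (w :: t) (pvGetA e 0) (pvGetA e 1))) (w :: t)) : Int) := by
  simp only [solution_alt, pyGet?_cons_zero, Option.getD_some]
  rfl

theorem good_iff (l : List (List Int)) (e : List Int) (hlen : ∀ f ∈ l, 2 ≤ f.length)
    (he2 : 2 ≤ e.length) : good l e ↔ domB l (pvGetA e 0) (pvGetA e 1) = false := by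
  unfold good
  rw [domB_eq_false_iff]
  constructor
  · intro h f hf
    rw [← getD_zero_eq e he2, ← getD_one_eq e he2, ← getD_zero_eq f (hlen f hf), ← getD_one_eq f (hlen f hf)]
    exact h f hf
  · intro h f hf
    rw [getD_zero_eq e he2, getD_one_eq e he2, getD_zero_eq f (hlen f hf), getD_one_eq f (hlen f hf)]
    exact h f hf

theorem D_iff (w : List Int) (t : List (List Int)) (hlen : ∀ e ∈ w :: t, 2 ≤ e.length) :
    D_solution (w :: t) ↔
      (domB (w :: t) (pvGetA w 0) (pvGetA w 1) = false ∧
       ∃ e ∈ w :: t, pvGetA e 1 < 0 ∧ w.sum < pvGetA e 0 + pvGetA e 1 ∧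
         domB (w :: t) (pvGetA e 0) (pvGetA e 1) = false) := by
  have hw := hlen w (List.mem_cons_self)
  unfold D_solution
  simp only [List.getD_cons_zero]
  constructor
  · rintro ⟨e, he, h1, h2, hge, hgw⟩
    have he2 := hlen e he
    exact ⟨(good_iff _ _ hlen hw).mp hgw, e, he, by rwa [getD_one_eq e he2] at h1,
      by rwa [getD_zero_eq e he2, getD_one_eq e he2] at h2, (good_iff _ _ hlen he2).mp hge⟩
  · rintro ⟨hund, e, he, h1, h2, h3⟩
    have he2 := hlen e he
    exact ⟨e, he, by rwa [getD_one_eq e he2], by rwa [getD_zero_eq e he2, getD_one_eq e he2],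
      (good_iff _ _ hlen he2).mpr h3, (good_iff _ _ hlen hw).mpr hund⟩

-- ===== VERDICT (by name: the statement is the Claim_ definition above) =====
theorem solution_spec : Claim_unchanged_solution := by
  intro scores hdom hpre hnd
  obtain ⟨hne, hlen⟩ := hpre
  match scores, hne, hlen, hnd with
  | w :: t, _, hlen, hnd =>
  rw [solution_closed, alt_closed]
  by_cases hdw : domB (w :: t) (pvGetA w 0) (pvGetA w 1) = true
  · simp only [hdw, if_true]
  · simp only [Bool.not_eq_true] at hdw
    simp only [hdw, Bool.false_eq_true, if_false]
    have hcnt := List.countP_congr (l := w :: t)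
      (p := fun e => decide (w.sum < pvGetA e 0 + pvGetA e 1) &&
          decide ((0 : Int) ≤ pvGetA e 1) && !(domB (w :: t) (pvGetA e 0) (pvGetA e 1)))
      (q := fun e => decide (w.sum < pvGetA e 0 + pvGetA e 1) && !(domB (w :: t) (pvGetA e 0) (pvGetA e 1)))
      ?_
    · rw [hcnt]
    · intro e he
      by_cases hde : domB (w :: t) (pvGetA e 0) (pvGetA e 1) = true
      · simp [hde]
      · simp only [Bool.not_eq_true] at hde
        by_cases hs : w.sum < pvGetA e 0 + pvGetA e 1
        · have h0 : (0 : Int) ≤ pvGetA e 1 := by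
            by_contra hneg
            simp only [not_le] at hneg
            exact hnd ((D_iff w t hlen).mpr ⟨hdw, e, he, hneg, hs, hde⟩)
          simp [hde, hs, h0]
        · simp [hde, hs]

theorem solution_changed : Claim_changed_solution := by
  unfold Claim_changed_solution; decide

theorem solution_tight : Claim_exact_solution := by
  intro scores hdom hpre hD
  obtain ⟨hne, hlen⟩ := hpre
  match scores, hne, hlen, hD with
  | w :: t, _, hlen, hD =>
  obtain ⟨hdw, e, he, hneg, hsumlt, hde⟩ := (D_iff w t hlen).mp hD
  rw [solution_closed, alt_closed]
  simp only [hdw, Bool.false_eq_true, if_false]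
  intro hEq
  have hlt := countP_lt
    (fun e => decide (w.sum < pvGetA e 0 + pvGetA e 1) &&
        decide ((0 : Int) ≤ pvGetA e 1) && !(domB (w :: t) (pvGetA e 0) (pvGetA e 1)))
    (fun e => decide (w.sum < pvGetA e 0 + pvGetA e 1) && !(domB (w :: t) (pvGetA e 0) (pvGetA e 1)))
    (w :: t) ?_ e he ?_ ?_
  · omega
  · intro a ha hpa
    simp only [Bool.and_eq_true, decide_eq_true_eq] at hpa ⊢
    exact ⟨hpa.1.1, hpa.2⟩
  · simp only [Bool.and_eq_true, decide_eq_true_eq]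
    exact ⟨hsumlt, by simp [hde]⟩
  · have hd1 : decide ((0 : Int) ≤ pvGetA e 1) = false := by simp; omega
    simp [hd1]
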